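-- pv_equiv track=rewrite | github.com/salafan391-ai/car_aucttions_multi_site | site_cars/happycar/classifier.py | _token_pos
-- ===== SOURCE A (Python) =====
-- def _is_latin_word(s: str) -> bool:
--     return any(c.isascii() and (c.isalpha() or c.isdigit()) for c in s)
--
-- def _token_pos(text: str, needle: str) -> int:
--     """Return position where `needle` appears as a standalone token in `text`,
--     or -1 if not found. For Latin models (e.g. `S60`, `K3`, `GLS 450D`) the
--     match must be delimited by non-alphanumeric chars on each side, so `S60`
--     does NOT match inside `GLS600`. For pure-Korean models, a plain substring
--     match is fine.
--     """
--     if not needle: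
--         return -1
--     latin = _is_latin_word(needle)
--     start = 0
--     while True:
--         i = text.find(needle, start)
--         if i < 0:
--             return -1
--         if not latin:
--             return i
--         before_ok = i == 0 or not (
--             text[i - 1].isascii() and text[i - 1].isalnum())
--         end = i + len(needle)
--         after_ok = end == len(text) or not (
--             text[end].isascii() and text[end].isalnum())
--         if before_ok and after_ok:
--             return i
--         start = i + 1
-- ===== SOURCE B (Python) =====
-- def _is_latin_word(s: str) -> bool:
--     return any(c.isascii() and (c.isalpha() or c.isdigit()) for c in s)
--
--
-- def _blocked(c: str) -> bool:
--     return c.isascii() and c.isalnum()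
--
--
-- def _token_pos(text: str, needle: str) -> int:
--     """Position of `needle` as a standalone token in `text`, or -1.
--
--     Non-Latin needles: plain first-occurrence substring search.
--     Latin needles: direct scan over every candidate index, comparing the
--     slice and the two delimiting characters in one test.
--     """
--     if not needle:
--         return -1
--     if not _is_latin_word(needle):
--         return text.find(needle)
--     n, m = len(text), len(needle)
--     for i in range(n - m + 1):
--         if (text[i:i + m] == needle
--                 and (i == 0 or not _blocked(text[i - 1]))
--                 and (i + m == n or not _blocked(text[i + m]))):
--             return i
--     return -1
-- ===== Notes on version B (the rewrite author's own statement) =====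
-- stated objective: alternative
-- what changed: Replaces A's find-and-restart while-loop with a dedicated non-Latin fast path (one plain substring find) and, for Latin needles, a direct scan over every candidate index that tests slice equality and both delimiting characters in a single condition.
import Mathlib
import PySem

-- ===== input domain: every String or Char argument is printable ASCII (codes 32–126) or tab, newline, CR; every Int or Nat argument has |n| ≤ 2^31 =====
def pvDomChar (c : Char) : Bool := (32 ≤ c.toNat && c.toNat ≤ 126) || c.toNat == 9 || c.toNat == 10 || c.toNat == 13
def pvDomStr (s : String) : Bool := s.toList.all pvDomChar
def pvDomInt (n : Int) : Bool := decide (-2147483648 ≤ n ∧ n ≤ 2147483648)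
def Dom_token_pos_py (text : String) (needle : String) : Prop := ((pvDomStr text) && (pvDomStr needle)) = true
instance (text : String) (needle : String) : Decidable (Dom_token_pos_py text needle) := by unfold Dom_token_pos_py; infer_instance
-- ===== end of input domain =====

-- B replaces A's find-and-restart loop by a non-Latin fast path plus a direct
-- candidate-index scan for Latin needles (alternative algorithm, same cost).

-- character tests shared by both Pythons: c.isascii(), the latin test, and the
-- "ascii alphanumeric" delimiter test (c.isascii() and c.isalnum())
def pvIsAscii (c : Char) : Bool := decide (c.toNat < 128)
def pvLatinChar (c : Char) : Bool := pvIsAscii c && (PySem.Chars.isalpha c || PySem.Chars.isdigit c)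
def pvBlocked (c : Char) : Bool := pvIsAscii c && PySem.Chars.isalnum c
-- _is_latin_word (identical in A's module and in Source B)
def pvIsLatinWord (cs : List Char) : Bool := cs.any pvLatinChar

-- ===== PORT A =====
-- the 'while True' loop of A; fuel = text.length + 1 - start bounds the restarts
def tokenLoopA (t nd : List Char) (latin : Bool) : Nat → Nat → Int
  | 0, _ => -1
  | fuel + 1, start =>
    let i := PySem.Chars.findFrom t nd (start : Int) none
    if i < 0 then -1
    else if !latin then i
    else
      let before_ok := (i == 0) || !(pvBlocked (PySem.List.pyGetD t (i - 1) ' '))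
      let e := i + (nd.length : Int)
      let after_ok := (e == (t.length : Int)) || !(pvBlocked (PySem.List.pyGetD t e ' '))
      if before_ok && after_ok then i
      else tokenLoopA t nd latin fuel (i.toNat + 1)

def token_pos_py (text : String) (needle : String) : Int :=
  let t := text.toList
  let nd := needle.toList
  if nd.isEmpty then -1
  else tokenLoopA t nd (pvIsLatinWord nd) (t.length + 1) 0

-- ===== PORT B =====
-- B's 'for i in range(n - m + 1)' scan (the range bound is the dite guard)
def scanB (t nd : List Char) (i : Nat) : Int :=
  if h : i + nd.length ≤ t.length then
    if (PySem.List.slice t (some (i : Int)) (some ((i : Int) + (nd.length : Int))) == nd)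
        && ((i == 0) || !(pvBlocked (PySem.List.pyGetD t ((i : Int) - 1) ' ')))
        && ((i + nd.length == t.length) || !(pvBlocked (PySem.List.pyGetD t ((i : Int) + (nd.length : Int)) ' ')))
    then (i : Int)
    else scanB t nd (i + 1)
  else -1
termination_by t.length + 1 - i
decreasing_by omega

def token_pos_py_alt (text : String) (needle : String) : Int :=
  let t := text.toList
  let nd := needle.toList
  if nd.isEmpty then -1
  else if !pvIsLatinWord nd then PySem.Chars.find t nd
  else scanB t nd 0

-- ===== PRECONDITION & SPEC =====
def Spec_token_pos_py (text : String) (needle : String) (out : Int) : Prop := out = token_pos_py_alt text needle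
instance (text : String) (needle : String) (out : Int) : Decidable (Spec_token_pos_py text needle out) := by unfold Spec_token_pos_py; infer_instance

-- ===== CLAIM (what is proved, stated in full; the proofs are below) =====
def Claim_equal_token_pos_py : Prop := ∀ (text : String) (needle : String), Dom_token_pos_py text needle → Spec_token_pos_py text needle (token_pos_py text needle)

-- ===== LEMMAS AND PROOFS =====

-- a needle matches at i iff B's slice test succeeds and the candidate fits
theorem prefix_drop_iff (t nd : List Char) (i : Nat) (hnd : nd ≠ []) :
    nd <+: t.drop i ↔ ((t.drop i).take nd.length = nd ∧ i + nd.length ≤ t.length) := by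
  constructor
  · intro hp
    have htake := List.prefix_iff_eq_take.mp hp
    refine ⟨htake.symm, ?_⟩
    have hlen := hp.length_le
    simp [List.length_drop] at hlen
    by_cases h : i ≤ t.length
    · omega
    · exfalso
      have : t.drop i = [] := List.drop_eq_nil_of_le (by omega)
      rw [this] at hp
      exact hnd (List.prefix_nil.mp hp)
  · intro ⟨hs, _⟩
    exact List.prefix_iff_eq_take.mpr hs.symm

theorem scanB_past (t nd : List Char) (i : Nat) (h : t.length < i + nd.length) :
    scanB t nd i = -1 := by
  rw [scanB]
  simp [Nat.not_le.mpr h]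

-- B's scan skips indices where the needle does not match
theorem scanB_skip (t nd : List Char) (hnd : nd ≠ []) :
    ∀ (d i : Nat), i + d ≤ t.length + 1 →
      (∀ k, i ≤ k → k < i + d → ¬ nd <+: t.drop k) → scanB t nd i = scanB t nd (i + d)
  | 0, i, _, _ => by simp
  | d + 1, i, hle, hno => by
    have hstep : scanB t nd i = scanB t nd (i + 1) := by
      rw [scanB]
      split
      · next hfit =>
        have hnp : ¬ nd <+: t.drop i := hno i le_rfl (by omega)
        have hslice : PySem.List.slice t (some (i : Int)) (some ((i : Int) + (nd.length : Int))) = (t.drop i).take nd.length :=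
          PySem.List.slice_natCast_add t i nd.length
        have hne : ¬ ((t.drop i).take nd.length = nd) := fun he =>
          hnp ((prefix_drop_iff t nd i hnd).mpr ⟨he, hfit⟩)
        simp [hslice, hne]
      · next hfit =>
        rw [scanB_past t nd (i + 1) (by omega)]
    rw [hstep]
    have := scanB_skip t nd hnd d (i + 1) (by omega) (fun k hk1 hk2 => hno k (by omega) (by omega))
    rw [this]
    congr 1
    omega

-- A's restart loop equals B's scan, for Latin needles
theorem loopA_eq_scanB (t nd : List Char) (hnd : nd ≠ []) :
    ∀ (fuel start : Nat), start ≤ t.length → t.length + 1 - start ≤ fuel →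
      tokenLoopA t nd true fuel start = scanB t nd start := by
  intro fuel
  induction fuel with
  | zero => intro start h1 h2; omega
  | succ fuel ih =>
    intro start hstart hfuel
    rw [tokenLoopA]
    rw [PySem.Chars.findFrom_natCast t nd start hstart]
    by_cases hfind : PySem.Chars.find (t.drop start) nd = -1
    · -- no occurrence at or after start: both sides -1
      simp only [hfind]
      have hnin : ¬ nd <:+: t.drop start := by
        have := (PySem.Chars.findFrom_natCast_eq_neg_one_iff t nd start hstart)
        rw [PySem.Chars.findFrom_natCast t nd start hstart, hfind] at this
        exact this.mp (by simp)
      have hno : ∀ k, start ≤ k → k < start + (t.length + 1 - start) → ¬ nd <+: t.drop k := by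
        intro k hk _ hp
        apply hnin
        rw [← PySem.Chars.isIn_iff_infix]
        rw [← PySem.Chars.exists_prefix_drop_iff_isIn]
        exact ⟨k - start, by rw [List.drop_drop, Nat.add_sub_cancel' hk]; exact hp⟩
      rw [scanB_skip t nd hnd (t.length + 1 - start) start (by omega) hno]
      rw [scanB_past t nd (start + (t.length + 1 - start)) (by have := List.length_pos_of_ne_nil hnd; omega)]
      norm_num
    · -- first occurrence at j = start + find
      have hge : 0 ≤ PySem.Chars.find (t.drop start) nd := by
        have := PySem.Chars.neg_one_le_find (t.drop start) nd
        omega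
      have hspec := PySem.Chars.findFrom_natCast_spec t nd start hstart (by
        rw [PySem.Chars.findFrom_natCast t nd start hstart, if_neg hfind]
        omega)
      rw [PySem.Chars.findFrom_natCast t nd start hstart, if_neg hfind] at hspec
      rw [if_neg hfind]
      set f : Int := (start : Int) + PySem.Chars.find (t.drop start) nd with hf
      have hfnn : 0 ≤ f := by positivity
      obtain ⟨hsle, hpre, hmin⟩ := hspec
      set j : Nat := f.toNat with hj
      have hfj : f = (j : Int) := by omega
      have hsj : start ≤ j := by omega
      -- the occurrence fits and B's slice test is true at j
      have hfit : j + nd.length ≤ t.length := ((prefix_drop_iff t nd j hnd).mp hpre).2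
      have hslice_eq : (t.drop j).take nd.length = nd := ((prefix_drop_iff t nd j hnd).mp hpre).1
      have hskip : scanB t nd start = scanB t nd j := by
        have := scanB_skip t nd hnd (j - start) start (by omega)
          (fun k hk1 hk2 => hmin k hk1 (by omega))
        rwa [Nat.add_sub_cancel' hsj] at this
      rw [hskip]
      have hlt : ¬ f < 0 := by omega
      rw [if_neg hlt]
      simp only [Bool.not_true, Bool.false_eq_true, if_false]
      -- align A's Int-side tests with B's Nat-side ones and compare the scans
      conv_rhs => rw [scanB]
      have hsliceB : PySem.List.slice t (some (j : Int)) (some ((j : Int) + (nd.length : Int))) = (t.drop j).take nd.length :=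
        PySem.List.slice_natCast_add t j nd.length
      rw [dif_pos hfit, hsliceB, hslice_eq]
      simp only [beq_self_eq_true, Bool.true_and]
      have h1 : (((j : Int)) == 0) = (j == 0) := by
        by_cases h : j = 0 <;> simp [h]
      have h2 : (((j : Int)) + (nd.length : Int) == ((t.length : Int))) = ((j + nd.length) == t.length) := by
        rw [show ((j : Int)) + (nd.length : Int) = (((j + nd.length : Nat)) : Int) from by push_cast; ring]
        simp only [beq_eq_decide, Nat.cast_inj]
      rw [hfj, h1, h2]
      split_ifs with hok
      · rfl
      · exact ih (j + 1) (by have := List.length_pos_of_ne_nil hnd; omega) (by omega)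

-- with a non-Latin needle A returns its first plain find
theorem loopA_false (t nd : List Char) (fuel : Nat) :
    tokenLoopA t nd false (fuel + 1) 0 = PySem.Chars.find t nd := by
  rw [tokenLoopA]
  have h0 : ((0 : Nat) : Int) = 0 := rfl
  rw [h0, PySem.Chars.findFrom_zero]
  have := PySem.Chars.neg_one_le_find t nd
  split
  · omega
  · simp

-- ===== VERDICT (by name: the statement is the Claim_ definition above) =====
theorem token_pos_py_spec : Claim_equal_token_pos_py := by
  intro text needle _
  unfold Spec_token_pos_py token_pos_py token_pos_py_alt
  by_cases hemp : needle.toList.isEmpty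
  · simp [hemp]
  · simp only [hemp, Bool.false_eq_true, if_false]
    have hnd : needle.toList ≠ [] := by simpa [List.isEmpty_iff] using hemp
    by_cases hlat : pvIsLatinWord needle.toList
    · simp only [hlat, Bool.not_true, Bool.false_eq_true, if_false]
      exact loopA_eq_scanB text.toList needle.toList hnd (text.toList.length + 1) 0
        (Nat.zero_le _) (by omega)
    · simp only [Bool.not_eq_true] at hlat
      simp only [hlat, Bool.not_false, if_true]
      exact loopA_false text.toList needle.toList text.toList.length
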